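-- pv_equiv track=rewrite | github.com/Carbonferrous/EulerPython | numbertheory.py | divisorList
-- ===== SOURCE A (Python) =====
-- def divisorList(n, x):
--     if n <= 0:
--         yield 0
--         return
--     elif n == 1:
--         yield 0
--         yield 1
--         return
--     elif n == 2:
--         yield 0
--         yield 1
--         yield 1 + 2**x
--         return
--     else:
--         pass
--     divList = [1]*(n + 1)
--     yield 0
--     yield divList[1]
--     for div in range(2, n+1):
--         for i in range(div, n+1, div):
--             divList[i] += div**x
--         yield divList[div]
-- ===== SOURCE B (Python) =====
-- def divisorList(n, x):
--     # sigma_x(k) per k by scanning divisor pairs (d, k//d) up to sqrt(k),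
--     # instead of A's shared sieve over multiples of every divisor.
--     yield 0
--     if n <= 0:
--         return
--     for k in range(1, n + 1):
--         s = 0
--         d = 1
--         while d * d <= k:
--             if k % d == 0:
--                 q = k // d
--                 s += d ** x
--                 if q != d:
--                     s += q ** x
--             d += 1
--         yield s
-- ===== Notes on version B (the rewrite author's own statement) =====
-- stated objective: alternative
-- what changed: A fills a shared table by sieving over the multiples of every divisor and yields table entries; B computes each sigma_x(k) independently from its divisor pairs (d, k//d) with d up to sqrt(k).
-- outside the precondition, e.g. on divisorList(1, -2): A returns [0, 1], B returns [0, 1.0]; on divisorList(3, -1): A returns [0, 1, 1.5, 1.3333333333333333], B returns [0, 1.0, 1.5, 1.3333333333333333]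
import Mathlib
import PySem

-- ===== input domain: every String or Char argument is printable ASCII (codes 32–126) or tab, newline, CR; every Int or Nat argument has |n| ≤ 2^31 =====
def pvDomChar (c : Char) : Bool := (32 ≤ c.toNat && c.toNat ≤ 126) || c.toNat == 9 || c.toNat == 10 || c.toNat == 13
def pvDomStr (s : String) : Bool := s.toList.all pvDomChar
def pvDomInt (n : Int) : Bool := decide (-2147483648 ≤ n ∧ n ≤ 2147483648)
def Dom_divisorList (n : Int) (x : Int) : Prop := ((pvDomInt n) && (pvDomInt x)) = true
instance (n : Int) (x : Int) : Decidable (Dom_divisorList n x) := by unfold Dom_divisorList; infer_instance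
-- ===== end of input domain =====

-- B replaces A's shared sieve table (adding d^x to every multiple of d) by an independent
-- divisor scan 1..k for each k; same values, genuinely different traversal (objective: alternative).

-- ===== PORT A =====
-- inner loop: 'for i in range(div, n+1, div): divList[i] += div**x'.
-- Indices i are ≥ div ≥ 2 and ≤ n, hence nonnegative and in range, so 'List.set i.toNat' is
-- exact for Python's in-range list assignment here.
def pvInner (n : Int) (c : Nat) (d : Int) (dl : List Int) : List Int :=
  (PySem.List.pyRange d (n + 1) d).foldl
    (fun dl i => dl.set i.toNat (dl.getD i.toNat 0 + d ^ c)) dl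

-- one iteration of 'for div in …': run the inner loop, then yield divList[div]
def pvOuter (n : Int) (c : Nat) (st : List Int × List Int) (d : Int) : List Int × List Int :=
  let dl := pvInner n c d st.1
  (dl, st.2 ++ [dl.getD d.toNat 0])

-- 'div**x' / '2**x' is ported as '_ ^ x.toNat'; exact since Pre_ restricts to 0 ≤ x when n ≥ 2
def divisorList (n : Int) (x : Int) : List Int :=
  if n ≤ 0 then [0]
  else if n = 1 then [0, 1]
  else if n = 2 then [0, 1, 1 + 2 ^ x.toNat]
  else
    let init : List Int := List.replicate (n + 1).toNat 1
    ((PySem.List.pyRange 2 (n + 1) 1).foldl (pvOuter n x.toNat)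
      (init, [0, init.getD 1 0])).2

-- ===== PORT B =====
-- termination helper for the 'while d * d <= k' loop: cited by pvScanAux's decreasing_by
theorem pv_le_of_sq_le (d k : Int) (h : d * d ≤ k) : d ≤ k := by
  nlinarith [mul_self_nonneg (2 * d - 1)]

-- 'while d * d <= k: if k % d == 0: q = k // d; s += d ** x; (if q != d: s += q ** x); d += 1'
def pvScanAux (c : Nat) (k : Int) (d : Int) (s : Int) : Int :=
  if h : d * d ≤ k then
    pvScanAux c k (d + 1)
      (if PySem.Int.mod k d = 0 then
        (let q := PySem.Int.floordiv k d
         let s1 := s + d ^ c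
         if q ≠ d then s1 + q ^ c else s1)
       else s)
  else s
termination_by (k + 1 - d).toNat
decreasing_by have := pv_le_of_sq_le d k h; omega

def divisorList_alt (n : Int) (x : Int) : List Int :=
  [0] ++ (if n ≤ 0 then []
          else (PySem.List.pyRange 1 (n + 1) 1).map (fun k => pvScanAux x.toNat k 1 0))

-- ===== PRECONDITION & SPEC =====
-- Pre_ excludes x < 0 with n ≥ 1: there Python's '**x' makes A (for n ≥ 2) and B (for n ≥ 1) yield floats, not ints.
def Pre_divisorList (n : Int) (x : Int) : Prop := n ≤ 0 ∨ 0 ≤ x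
instance (n : Int) (x : Int) : Decidable (Pre_divisorList n x) := by unfold Pre_divisorList; infer_instance
def pvWitness_divisorList : Int × Int := (6, 2)

def Spec_divisorList (n : Int) (x : Int) (out : List Int) : Prop := out = divisorList_alt n x
instance (n : Int) (x : Int) (out : List Int) : Decidable (Spec_divisorList n x out) := by unfold Spec_divisorList; infer_instance

-- ===== CLAIM (what is proved, stated in full; the proofs are below) =====
def Claim_equal_divisorList : Prop := ∀ (n : Int) (x : Int), Dom_divisorList n x → Pre_divisorList n x → Spec_divisorList n x (divisorList n x)

-- ===== LEMMAS AND PROOFS =====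

-- divisor-power partial sum over the divisors t with 2 ≤ t < m
def pvPart (c : Nat) (m j : Int) : Int :=
  (((PySem.List.pyRange 2 m 1).filter (fun t => decide (t ∣ j))).map (fun t => t ^ c)).sum

theorem pvPart_le (c : Nat) (m j : Int) (h : m ≤ 2) : pvPart c m j = 0 := by
  simp [pvPart, PySem.List.pyRange_one_eq_nil h]

theorem pvPart_succ (c : Nat) (m j : Int) (hm : 2 ≤ m) :
    pvPart c (m + 1) j = pvPart c m j + (if m ∣ j then m ^ c else 0) := by
  rw [pvPart, PySem.List.pyRange_one_succ_right hm]
  by_cases h : m ∣ j <;> simp [pvPart, h]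

theorem foldl_set_length (L : List Int) (f : Int → Int → Int) :
    ∀ dl : List Int, (L.foldl (fun dl i => dl.set i.toNat (f (dl.getD i.toNat 0) i)) dl).length = dl.length := by
  induction L with
  | nil => intro dl; rfl
  | cons i L ih => intro dl; rw [List.foldl_cons, ih, List.length_set]

theorem pvInner_length (n : Int) (c : Nat) (d : Int) (dl : List Int) :
    (pvInner n c d dl).length = dl.length :=
  foldl_set_length _ (fun v _ => v + d ^ c) dl

theorem nodup_pyRange_pos (a b s : Int) (hs : 0 < s) : (PySem.List.pyRange a b s).Nodup := by
  rw [PySem.List.pyRange_of_pos a b hs]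
  refine List.Nodup.map ?_ (List.nodup_range)
  intro u v h
  have : a + s * (u : Int) = a + s * (v : Int) := h
  have h2 : (u : Int) = (v : Int) := by
    have := mul_left_cancel₀ (a := s) (by omega : s ≠ 0) (by omega : s * (u:Int) = s * (v:Int))
    exact this
  exact_mod_cast h2

-- effect of the inner sieve loop read pointwise
theorem getD_foldl_set (L : List Int) (v : Int) (hpos : ∀ i ∈ L, 0 ≤ i) (hnd : L.Nodup) :
    ∀ (dl : List Int), (∀ i ∈ L, i.toNat < dl.length) → ∀ j : Nat,
      (L.foldl (fun dl i => dl.set i.toNat (dl.getD i.toNat 0 + v)) dl).getD j 0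
        = dl.getD j 0 + (if (j : Int) ∈ L then v else 0) := by
  induction L with
  | nil => intro dl _ j; simp
  | cons i L ih =>
    intro dl hlen j
    have hi0 : 0 ≤ i := hpos i (by simp)
    have hilen : i.toNat < dl.length := hlen i (by simp)
    have hnd' : L.Nodup := hnd.of_cons
    have hpos' : ∀ t ∈ L, 0 ≤ t := fun t ht => hpos t (by simp [ht])
    have hlen' : ∀ t ∈ L, t.toNat < (dl.set i.toNat (dl.getD i.toNat 0 + v)).length := by
      intro t ht; simpa using hlen t (by simp [ht])
    rw [List.foldl_cons, ih hpos' hnd' _ hlen' j]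
    by_cases hji : (j : Int) = i
    · have hj : j = i.toNat := by omega
      have hjL : (j : Int) ∉ L := by rw [hji]; exact (List.nodup_cons.mp hnd).1
      subst hj
      have hset : (dl.set i.toNat (dl.getD i.toNat 0 + v)).getD i.toNat 0
          = dl.getD i.toNat 0 + v := by
        simp [List.getD_eq_getElem?_getD, hilen]
      rw [if_neg hjL, add_zero, hset]
      simp [hji]
    · have hne : i.toNat ≠ j := by omega
      have : (dl.set i.toNat (dl.getD i.toNat 0 + v)).getD j 0 = dl.getD j 0 := by
        simp [List.getD_eq_getElem?_getD, List.getElem?_set_ne hne]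
      rw [this]
      simp [hji]

theorem pvInner_getD (n : Int) (c : Nat) (d : Int) (hd : 2 ≤ d) (dl : List Int)
    (hlen : dl.length = (n + 1).toNat) (hn : 3 ≤ n) (j : Nat) :
    (pvInner n c d dl).getD j 0
      = dl.getD j 0 + (if (j : Int) ∈ PySem.List.pyRange d (n + 1) d then d ^ c else 0) := by
  refine getD_foldl_set _ _ ?_ (nodup_pyRange_pos _ _ _ (by omega)) dl ?_ j
  · intro i hi
    have := (PySem.List.mem_pyRange_iff_of_pos (by omega : (0:Int) < d) i).mp hi
    omega
  · intro i hi
    have := (PySem.List.mem_pyRange_iff_of_pos (by omega : (0:Int) < d) i).mp hi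
    omega

theorem mem_mult_iff (n d j : Int) (hd : 2 ≤ d) (hj1 : 1 ≤ j) (hjn : j ≤ n) :
    ((j : Int) ∈ PySem.List.pyRange d (n + 1) d) ↔ d ∣ j := by
  rw [PySem.List.mem_pyRange_iff_of_pos (by omega : (0:Int) < d)]
  constructor
  · rintro ⟨h1, h2, h3⟩
    have : d ∣ j := by simpa using Int.dvd_add h3 (dvd_refl d)
    exact this
  · intro h
    refine ⟨Int.le_of_dvd (by omega) h, by omega, ?_⟩
    exact Int.dvd_sub h (dvd_refl d)

-- the outer fold invariant
theorem outer_invariant (n : Int) (c : Nat) (hn : 3 ≤ n) (m : Int) (hm2 : 2 ≤ m) (hmn : m ≤ n + 1) :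
    (((PySem.List.pyRange 2 m 1).foldl (pvOuter n c)
        (List.replicate (n + 1).toNat 1, [0, (List.replicate (n + 1).toNat (1:Int)).getD 1 0])).1.length
      = (n + 1).toNat)
    ∧ (∀ j : Nat, 1 ≤ j → (j : Int) ≤ n →
        ((PySem.List.pyRange 2 m 1).foldl (pvOuter n c)
          (List.replicate (n + 1).toNat 1, [0, (List.replicate (n + 1).toNat (1:Int)).getD 1 0])).1.getD j 0
        = 1 + pvPart c m (j : Int))
    ∧ ((PySem.List.pyRange 2 m 1).foldl (pvOuter n c)
          (List.replicate (n + 1).toNat 1, [0, (List.replicate (n + 1).toNat (1:Int)).getD 1 0])).2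
        = [0, 1] ++ (PySem.List.pyRange 2 m 1).map (fun d => 1 + pvPart c (d + 1) d) := by
  induction m, hm2 using Int.le_induction with
  | base =>
    rw [PySem.List.pyRange_one_eq_nil (le_refl (2:Int))]
    refine ⟨by simp, ?_, ?_⟩
    · intro j hj1 hjn
      have hjlt : j < (n + 1).toNat := by omega
      simp only [List.foldl_nil]
      rw [pvPart_le c 2 (j:Int) (le_refl 2), List.getD_replicate 1 hjlt]
      norm_num
    · have h1 : (1:Nat) < (n + 1).toNat := by omega
      simp only [List.foldl_nil]
      rw [List.getD_replicate 1 h1]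
      simp
  | succ m hm2 ih =>
    have hmn' : m ≤ n + 1 := by omega
    obtain ⟨iha, ihb, ihc⟩ := ih hmn'
    rw [PySem.List.pyRange_one_succ_right (by omega : (2:Int) ≤ m), List.foldl_append,
        List.foldl_cons, List.foldl_nil]
    set st := (PySem.List.pyRange 2 m 1).foldl (pvOuter n c)
      (List.replicate (n + 1).toNat 1, [0, (List.replicate (n + 1).toNat (1:Int)).getD 1 0]) with hst
    have hdlget : ∀ j : Nat, 1 ≤ j → (j : Int) ≤ n →
        (pvInner n c m st.1).getD j 0 = 1 + pvPart c (m + 1) (j : Int) := by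
      intro j hj1 hjn
      rw [pvInner_getD n c m (by omega) st.1 iha hn j]
      rw [ihb j hj1 hjn]
      have hmem := mem_mult_iff n m (j:Int) (by omega) (by exact_mod_cast hj1) hjn
      rw [pvPart_succ c m (j:Int) (by omega)]
      by_cases h : m ∣ (j:Int)
      · rw [if_pos (hmem.mpr h), if_pos h]; ring
      · rw [if_neg (fun hc => h (hmem.mp hc)), if_neg h]; ring
    refine ⟨?_, ?_, ?_⟩
    · show (pvInner n c m st.1).length = (n + 1).toNat
      rw [pvInner_length, iha]
    · intro j hj1 hjn
      exact hdlget j hj1 hjn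
    · show st.2 ++ [(pvInner n c m st.1).getD m.toNat 0] = _
      have hm' : ((m.toNat : Nat) : Int) = m := by omega
      have := hdlget m.toNat (by omega) (by omega)
      rw [hm'] at this
      rw [this, ihc]
      simp

-- ---- B side: the sqrt scan collects each divisor pair (t, k/t) ----

-- cofactor facts: for 1 ≤ t ∣ k (k ≥ 1), q = k // t is a divisor with t * q = k
theorem pv_cof (k t : Int) (hk : 1 ≤ k) (ht : 1 ≤ t) (hd : t ∣ k) :
    1 ≤ PySem.Int.floordiv k t ∧ PySem.Int.floordiv k t ≤ k ∧
      PySem.Int.floordiv k t ∣ k ∧ t * PySem.Int.floordiv k t = k := by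
  rw [PySem.Int.floordiv_eq_ediv_of_pos (by omega : (0:Int) < t)]
  have hmul : k / t * t = k := Int.ediv_mul_cancel hd
  have hq1 : 1 ≤ k / t := by nlinarith [Int.ediv_mul_cancel hd]
  refine ⟨hq1, by nlinarith, ⟨t, by linarith⟩, by linarith⟩

theorem pv_floordiv_of_eq (t u k : Int) (ht : 1 ≤ t) (hmul : t * u = k) :
    PySem.Int.floordiv k t = u := by
  rw [PySem.Int.floordiv_eq_ediv_of_pos (by omega : (0:Int) < t), ← hmul,
      Int.mul_ediv_cancel_left u (by omega : t ≠ 0)]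

-- the small / large halves of the divisor sum still to be collected from d upward
def pvSmall (c : Nat) (k d : Int) : Int :=
  (((PySem.List.pyRange d (k + 1) 1).filter
      (fun t => decide (t ∣ k ∧ t * t ≤ k))).map (fun t => t ^ c)).sum
def pvLarge (c : Nat) (k d : Int) : Int :=
  (((PySem.List.pyRange d (k + 1) 1).filter
      (fun t => decide (t ∣ k ∧ t * t < k))).map (fun t => (PySem.Int.floordiv k t) ^ c)).sum

theorem pvScanAux_eq (c : Nat) (k : Int) (hk : 1 ≤ k) (d s : Int) (hd : 1 ≤ d) :
    pvScanAux c k d s = s + pvSmall c k d + pvLarge c k d := by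
  rw [pvScanAux]
  by_cases h : d * d ≤ k
  · have hdk : d ≤ k := pv_le_of_sq_le d k h
    have hS : pvSmall c k d = (if d ∣ k then d ^ c else 0) + pvSmall c k (d + 1) := by
      rw [pvSmall, pvSmall, PySem.List.pyRange_one_cons (by omega : d < k + 1), List.filter_cons]
      by_cases hdvd : d ∣ k
      · simp [hdvd, h]
      · simp [hdvd]
    have hL : pvLarge c k d
        = (if d ∣ k ∧ d * d < k then (PySem.Int.floordiv k d) ^ c else 0) + pvLarge c k (d + 1) := by
      rw [pvLarge, pvLarge, PySem.List.pyRange_one_cons (by omega : d < k + 1), List.filter_cons]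
      by_cases hdvd : d ∣ k <;> by_cases hlt : d * d < k <;> simp [hdvd, hlt]
    rw [dif_pos h, pvScanAux_eq c k hk (d + 1) _ (by omega), hS, hL]
    by_cases hdvd : d ∣ k
    · have hq := pv_cof k d hk hd hdvd
      have hiff : PySem.Int.floordiv k d ≠ d ↔ d * d < k := by
        constructor
        · intro hne
          rcases lt_or_eq_of_le h with h' | h'
          · exact h'
          · exact absurd (pv_floordiv_of_eq d d k hd h') hne
        · intro hlt he
          rw [he] at hq
          omega
      have hmod : PySem.Int.mod k d = 0 := (PySem.Int.mod_eq_zero_iff_dvd k d).mpr hdvd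
      have hval : (if PySem.Int.mod k d = 0 then
            (let q := PySem.Int.floordiv k d
             let s1 := s + d ^ c
             if q ≠ d then s1 + q ^ c else s1)
           else s)
          = s + d ^ c + (if d * d < k then (PySem.Int.floordiv k d) ^ c else 0) := by
        rw [if_pos hmod]
        show (if PySem.Int.floordiv k d ≠ d then (s + d ^ c) + (PySem.Int.floordiv k d) ^ c
              else s + d ^ c) = _
        by_cases hlt : d * d < k
        · rw [if_pos (hiff.mpr hlt), if_pos hlt]
        · rw [if_neg (fun hne => hlt (hiff.mp hne)), if_neg hlt]
          ring
      rw [hval, if_pos hdvd]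
      by_cases hlt : d * d < k
      · rw [if_pos hlt, if_pos (⟨hdvd, hlt⟩ : d ∣ k ∧ d * d < k)]
        ring
      · rw [if_neg hlt, if_neg (fun hc : d ∣ k ∧ d * d < k => hlt hc.2)]
        ring
    · have hmod : ¬ PySem.Int.mod k d = 0 :=
        fun hc => hdvd ((PySem.Int.mod_eq_zero_iff_dvd k d).mp hc)
      rw [if_neg hmod, if_neg hdvd, if_neg (fun hc : d ∣ k ∧ d * d < k => hdvd hc.1)]
      ring
  · rw [dif_neg h]
    have hnone : ∀ t ∈ PySem.List.pyRange d (k + 1) 1, ¬ (t * t ≤ k) := by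
      intro t ht
      have h1 := PySem.List.mem_pyRange_one.mp ht
      have : d * d ≤ t * t := by nlinarith
      omega
    have h1 : pvSmall c k d = 0 := by
      rw [pvSmall, List.filter_eq_nil_iff.mpr ?_]
      · simp
      · intro t ht
        simp only [decide_eq_true_eq, not_and]
        intro _
        exact hnone t ht
    have h2 : pvLarge c k d = 0 := by
      rw [pvLarge, List.filter_eq_nil_iff.mpr ?_]
      · simp
      · intro t ht
        simp only [decide_eq_true_eq, not_and]
        intro _ hlt
        exact hnone t ht (by omega)
    rw [h1, h2]
    ring
termination_by (k + 1 - d).toNat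
decreasing_by have := pv_le_of_sq_le d k h; omega

-- splitting a filtered sum along a second condition
theorem sum_filter_split (k : Int) (f : Int → Int) (L : List Int) :
    (((L.filter (fun t => decide (t ∣ k ∧ t * t ≤ k))).map f).sum)
      + (((L.filter (fun t => decide (t ∣ k ∧ k < t * t))).map f).sum)
    = ((L.filter (fun t => decide (t ∣ k))).map f).sum := by
  induction L with
  | nil => simp
  | cons a L ih =>
    simp only [List.filter_cons]
    by_cases hp : a ∣ k
    · by_cases hq : a * a ≤ k
      · have c1 : decide (a ∣ k ∧ a * a ≤ k) = true := by simp [hp, hq]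
        have c2 : decide (a ∣ k ∧ k < a * a) = false := by
          simp only [decide_eq_false_iff_not, not_and]
          intro _
          omega
        have c3 : decide (a ∣ k) = true := by simp [hp]
        simp only [c1, c2, c3, if_true, Bool.false_eq_true, if_false,
          List.map_cons, List.sum_cons]
        omega
      · have c1 : decide (a ∣ k ∧ a * a ≤ k) = false := by
          simp only [decide_eq_false_iff_not, not_and]
          intro _
          omega
        have c2 : decide (a ∣ k ∧ k < a * a) = true := by
          simp only [decide_eq_true_eq]
          exact ⟨hp, by omega⟩
        have c3 : decide (a ∣ k) = true := by simp [hp]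
        simp only [c1, c2, c3, if_true, Bool.false_eq_true, if_false,
          List.map_cons, List.sum_cons]
        omega
    · have c1 : decide (a ∣ k ∧ a * a ≤ k) = false := by simp [hp]
      have c2 : decide (a ∣ k ∧ k < a * a) = false := by simp [hp]
      have c3 : decide (a ∣ k) = false := by simp [hp]
      simp only [c1, c2, c3, Bool.false_eq_true, if_false]
      exact ih

-- the large half is the image of the strictly-small half under t ↦ k // t
theorem pv_reflect (c : Nat) (k : Int) (hk : 1 ≤ k) :
    pvLarge c k 1
      = (((PySem.List.pyRange 1 (k + 1) 1).filter
            (fun u => decide (u ∣ k ∧ k < u * u))).map (fun u => u ^ c)).sum := by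
  rw [pvLarge]
  set L1 := (PySem.List.pyRange 1 (k + 1) 1).filter (fun t => decide (t ∣ k ∧ t * t < k)) with hL1
  set L2 := (PySem.List.pyRange 1 (k + 1) 1).filter (fun u => decide (u ∣ k ∧ k < u * u)) with hL2
  have hmemL1 : ∀ t ∈ L1, 1 ≤ t ∧ t ≤ k ∧ t ∣ k ∧ t * t < k := by
    intro t ht
    rw [hL1, List.mem_filter] at ht
    have h1 := PySem.List.mem_pyRange_one.mp ht.1
    have h2 := of_decide_eq_true ht.2
    exact ⟨by omega, by omega, h2.1, h2.2⟩
  have hmemL2 : ∀ u, u ∈ L2 ↔ 1 ≤ u ∧ u ≤ k ∧ u ∣ k ∧ k < u * u := by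
    intro u
    rw [hL2, List.mem_filter, PySem.List.mem_pyRange_one, decide_eq_true_eq]
    constructor
    · rintro ⟨⟨h1, h2⟩, h3⟩
      exact ⟨h1, by omega, h3.1, h3.2⟩
    · rintro ⟨h1, h2, h3, h4⟩
      exact ⟨⟨h1, by omega⟩, ⟨h3, h4⟩⟩
  have hperm : (L1.map (fun t => PySem.Int.floordiv k t)).Perm L2 := by
    apply List.perm_of_nodup_nodup_toFinset_eq
    · refine List.Nodup.map_on ?_ ((PySem.List.nodup_pyRange_one 1 (k+1)).filter _)
      intro t1 h1 t2 h2 he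
      obtain ⟨ht1, _, hd1, _⟩ := hmemL1 t1 h1
      obtain ⟨ht2, _, hd2, _⟩ := hmemL1 t2 h2
      obtain ⟨hq1, _, _, hm1⟩ := pv_cof k t1 hk ht1 hd1
      obtain ⟨hq2, _, _, hm2⟩ := pv_cof k t2 hk ht2 hd2
      rw [he] at hm1
      have : t1 * PySem.Int.floordiv k t2 = t2 * PySem.Int.floordiv k t2 := by omega
      exact mul_right_cancel₀ (by omega) this
    · exact (PySem.List.nodup_pyRange_one 1 (k+1)).filter _
    · ext u
      simp only [List.mem_toFinset, List.mem_map]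
      rw [hmemL2 u]
      constructor
      · rintro ⟨t, htL, rfl⟩
        obtain ⟨ht1, _, hd, hsq⟩ := hmemL1 t htL
        obtain ⟨hq1, hq2, hq3, hm⟩ := pv_cof k t hk ht1 hd
        refine ⟨hq1, hq2, hq3, by nlinarith⟩
      · rintro ⟨h1, h2, h3, h4⟩
        obtain ⟨ht1, ht2, ht3, hm⟩ := pv_cof k u hk h1 h3
        refine ⟨PySem.Int.floordiv k u, ?_, ?_⟩
        · rw [hL1, List.mem_filter, PySem.List.mem_pyRange_one, decide_eq_true_eq]
          exact ⟨⟨ht1, by omega⟩, ⟨ht3, by nlinarith⟩⟩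
        · exact pv_floordiv_of_eq _ u k ht1 (by linarith)
  calc (L1.map (fun t => (PySem.Int.floordiv k t) ^ c)).sum
      = ((L1.map (fun t => PySem.Int.floordiv k t)).map (fun u => u ^ c)).sum := by
        rw [List.map_map]
        rfl
    _ = (L2.map (fun u => u ^ c)).sum := (hperm.map (fun u => u ^ c)).sum_eq

theorem pvPart_two_one (c : Nat) : pvPart c 2 1 = 0 :=
  pvPart_le c 2 1 (le_refl 2)

theorem pvPart_three_two (c : Nat) : pvPart c 3 2 = 2 ^ c := by
  rw [pvPart, show (3:Int) = 2 + 1 by norm_num, PySem.List.pyRange_one_singleton]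
  simp

theorem pvScan_val (c : Nat) (k : Int) (hk : 1 ≤ k) :
    pvScanAux c k 1 0 = 1 + pvPart c (k + 1) k := by
  rw [pvScanAux_eq c k hk 1 0 (le_refl 1), pv_reflect c k hk]
  have hsmall : pvSmall c k 1
      = (((PySem.List.pyRange 1 (k + 1) 1).filter
            (fun t => decide (t ∣ k ∧ t * t ≤ k))).map (fun t => t ^ c)).sum := rfl
  rw [zero_add, hsmall, sum_filter_split k (fun t => t ^ c)]
  rw [PySem.List.pyRange_one_cons (by omega : (1:Int) < k + 1)]
  simp only [List.filter_cons, one_dvd, decide_true, if_true,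
    List.map_cons, List.sum_cons, one_pow]
  rw [pvPart]
  norm_num

theorem divisorList_spec' : ∀ (n x : Int), divisorList n x = divisorList_alt n x := by
  intro n x
  by_cases h0 : n ≤ 0
  · simp [divisorList, divisorList_alt, h0]
  · by_cases h1 : n = 1
    · subst h1
      rw [divisorList, divisorList_alt]
      norm_num
      rw [show (2:Int) = 1 + 1 by norm_num, PySem.List.pyRange_one_singleton]
      simp [pvScan_val x.toNat 1 (le_refl 1), pvPart_two_one]
    · by_cases h2 : n = 2
      · subst h2
        rw [divisorList, divisorList_alt]
        norm_num
        rw [PySem.List.pyRange_one_cons (by norm_num : (1:Int) < 3),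
            show (1:Int) + 1 = 2 by norm_num,
            PySem.List.pyRange_one_cons (by norm_num : (2:Int) < 3),
            show (2:Int) + 1 = 3 by norm_num,
            PySem.List.pyRange_one_eq_nil (by norm_num : (3:Int) ≤ 3)]
        simp [pvScan_val x.toNat 1 (le_refl 1), pvScan_val x.toNat 2 (by norm_num),
          pvPart_two_one, pvPart_three_two]
      · have hn : 3 ≤ n := by omega
        obtain ⟨_, _, hout⟩ := outer_invariant n x.toNat hn (n + 1) (by omega) (le_refl _)
        rw [divisorList, if_neg h0, if_neg h1, if_neg h2, divisorList_alt, if_neg h0]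
        rw [hout]
        rw [PySem.List.pyRange_one_cons (by omega : (1:Int) < n + 1),
            show (1:Int) + 1 = 2 by norm_num, List.map_cons,
            pvScan_val x.toNat 1 (le_refl 1)]
        have : (PySem.List.pyRange 2 (n+1) 1).map (fun k => pvScanAux x.toNat k 1 0)
            = (PySem.List.pyRange 2 (n+1) 1).map (fun d => 1 + pvPart x.toNat (d + 1) d) := by
          refine List.map_congr_left ?_
          intro d hd
          have h2 := (PySem.List.mem_pyRange_one.mp hd).1
          exact pvScan_val x.toNat d (by omega)
        rw [this]
        simp [pvPart_two_one]

-- ===== VERDICT (by name: the statement is the Claim_ definition above) =====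
theorem divisorList_spec : Claim_equal_divisorList := by
  intro n x _ _
  unfold Spec_divisorList
  exact divisorList_spec' n x
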